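-- pv_equiv track=rewrite | github.com/halqin/py_practise | gender.py | sexChange
-- ===== SOURCE A (Python) =====
-- def translate(gender, dic_):
-- 	'''
-- 	>>> translations = {'he':'she', 'brother':'sister'}
-- 	>>> translate('he', translations)
-- 	'she'
-- 	>>> translate('HE', translations)
-- 	'SHE'
-- 	>>> translate('He', translations)
-- 	'She'
-- 	>>> translate('brother', translations)
-- 	'sister'
-- 	>>> translate('my', translations)
-- 	'my'
-- 	'''
-- 	lowStr = gender.lower()
-- 	transStr = dic_.get(lowStr, gender)
--
-- 	if gender.istitle():
-- 		restult = transStr.capitalize()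
-- 	elif not gender.islower():
-- 		restult = transStr.upper()
-- 	else:
-- 		restult = transStr
--
-- 	return restult
--
-- def sexChange(sentence, translations):
-- 	'''
-- 	>>> translations = {'he':'she', 'brother':'sister'}
-- 	>>> sexChange('He is my brother.', translations)
-- 	'She is my sister.'
-- 	'''
--
-- # split sentence into words and apply translation on each word
--
-- 	word, translation = '', ''
--
-- 	for character in sentence:
--
-- 		if character.isalpha():
--
-- 			word += character
--
-- 		else:
--
-- 			translation += translate(word, translations) + character
-- 			word = ''
--
-- 	# return translated sentence
--
-- 	return translation + translate(word, translations)
-- ===== SOURCE B (Python) =====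
-- def translate(gender, dic_):
-- 	lowStr = gender.lower()
-- 	transStr = dic_.get(lowStr, gender)
--
-- 	if gender.istitle():
-- 		restult = transStr.capitalize()
-- 	elif not gender.islower():
-- 		restult = transStr.upper()
-- 	else:
-- 		restult = transStr
--
-- 	return restult
--
-- def sexChange(sentence, translations):
-- 	# scan maximal runs of alphabetic / non-alphabetic characters;
-- 	# translate the alphabetic runs, copy the separator runs verbatim
-- 	result = ''
-- 	i, n = 0, len(sentence)
-- 	while i < n:
-- 		isword = sentence[i].isalpha()
-- 		j = i
-- 		while j < n and sentence[j].isalpha() == isword: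
-- 			j += 1
-- 		chunk = sentence[i:j]
-- 		result += translate(chunk, translations) if isword else chunk
-- 		i = j
-- 	return result
-- ===== Notes on version B (the rewrite author's own statement) =====
-- stated objective: alternative
-- what changed: B replaces A's char-by-char accumulator with flush-on-separator by an index-based scan over maximal alphabetic/non-alphabetic runs (a hand-rolled groupby): each alphabetic run is translated as a word, each separator run is copied verbatim.
-- outside the precondition, e.g. on sexChange('.', {'': 'x'}): A returns 'X.X', B returns '.'; on sexChange('a  b', {'': 'x', 'a': 'q'}): A returns 'q X b', B returns 'q  b'
import Mathlib
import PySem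

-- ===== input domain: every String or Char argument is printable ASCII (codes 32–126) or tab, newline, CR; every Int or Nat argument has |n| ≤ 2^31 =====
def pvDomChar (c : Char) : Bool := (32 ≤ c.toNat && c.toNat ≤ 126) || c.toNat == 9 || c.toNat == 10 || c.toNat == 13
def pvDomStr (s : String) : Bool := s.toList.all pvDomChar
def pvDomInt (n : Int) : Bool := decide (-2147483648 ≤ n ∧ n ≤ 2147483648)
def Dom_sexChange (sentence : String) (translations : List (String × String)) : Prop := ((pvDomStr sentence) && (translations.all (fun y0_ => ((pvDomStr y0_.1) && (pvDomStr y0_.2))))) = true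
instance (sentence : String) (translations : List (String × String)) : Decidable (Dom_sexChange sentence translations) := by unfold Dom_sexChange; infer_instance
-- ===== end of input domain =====

-- B rewrites sexChange to scan maximal alphabetic/non-alphabetic runs (an index-based groupby)
-- instead of A's char-by-char accumulator with flush-on-separator; objective: alternative decomposition.

-- ===== PORT A =====
-- shared helper: port of `translate` (Source B keeps it unchanged), working on List Char
-- str.istitle, hand-ported (exact on the ASCII domain, where cased chars = ASCII letters)
def pyIstitle : List Char → Bool → Bool → Bool
  | [], _, found => found
  | c :: cs, prevCased, found =>
      if PySem.Chars.isupper c then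
        (if prevCased then false else pyIstitle cs true true)
      else if PySem.Chars.islower c then
        (if prevCased then pyIstitle cs true true else false)
      else pyIstitle cs false found

-- str.islower on a whole string, hand-ported (exact on the ASCII domain):
-- at least one cased character and no uppercase one
def pyStrIslower (cs : List Char) : Bool :=
  cs.any PySem.Chars.islower && cs.all (fun c => !PySem.Chars.isupper c)

-- str.capitalize, hand-ported (exact on the ASCII domain): first char uppercased, rest lowered
def pyCapitalize : List Char → List Char
  | [] => []
  | c :: cs => PySem.Chars.upperChar c :: PySem.Chars.lower cs

def translateP (gender : List Char) (dic : List (String × String)) : List Char :=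
  let lowStr := PySem.Chars.lower gender
  let transStr := match dic.find? (fun p => p.1.toList == lowStr) with   -- dic_.get(lowStr, gender): first match
    | some p => p.2.toList
    | none => gender
  if pyIstitle gender false false then pyCapitalize transStr
  else if !pyStrIslower gender then PySem.Chars.upper transStr
  else transStr

-- one iteration of A's for-loop, state = (word, translation)
def stepA (dic : List (String × String)) (st : List Char × List Char) (c : Char) : List Char × List Char :=
  if PySem.Chars.isalpha c then (st.1 ++ [c], st.2)
  else ([], st.2 ++ translateP st.1 dic ++ [c])

def sexChange (sentence : String) (translations : List (String × String)) : String :=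
  let st := sentence.toList.foldl (stepA translations) ([], [])
  String.mk (st.2 ++ translateP st.1 translations)

-- ===== PORT B =====
-- Source B's outer while loop; the inner `while j < n and sentence[j].isalpha() == isword`
-- run scan is takeWhile/dropWhile on the same predicate, chunk = sentence[i:j]
def goB (dic : List (String × String)) : List Char → List Char
  | [] => []
  | c :: cs =>
      let isword := PySem.Chars.isalpha c
      let run := cs.takeWhile (fun d => PySem.Chars.isalpha d == isword)
      let rest := cs.dropWhile (fun d => PySem.Chars.isalpha d == isword)
      (if isword then translateP (c :: run) dic else c :: run) ++ goB dic rest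
termination_by cs => cs.length
decreasing_by
  simp only [List.length_cons]
  have := List.length_dropWhile_le (fun d => PySem.Chars.isalpha d == PySem.Chars.isalpha c) cs
  omega

def sexChange_alt (sentence : String) (translations : List (String × String)) : String :=
  String.mk (goB translations sentence.toList)

-- ===== PRECONDITION & SPEC =====
-- Pre_ excludes one degenerate corner on which A still returns: translation tables whose entry
-- for the empty string is non-empty, combined with sentences that have an empty word slot
-- (empty sentence, leading or trailing separator, or two adjacent separators); there A's
-- per-character flush calls translate('') and splices its uppercased table value into the
-- output (e.g. 'X.X' for '.' with {'': 'x'}) while B copies separator runs verbatim ('.');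
-- a table entry for the empty word matches no word of any sentence, so neither value is specified.
-- true iff A flushes an empty word somewhere after the first character (adjacent separators or a trailing one)
def pvSlotTail : List Char → Bool
  | [] => true
  | [c] => !PySem.Chars.isalpha c
  | c :: d :: rest => (!PySem.Chars.isalpha c && !PySem.Chars.isalpha d) || pvSlotTail (d :: rest)

-- true iff A calls translate('') on this sentence: empty sentence, leading separator, or pvSlotTail
def pvEmptyWordSlot (cs : List Char) : Bool :=
  match cs with
  | [] => true
  | c :: _ => !PySem.Chars.isalpha c || pvSlotTail cs

def Pre_sexChange (sentence : String) (translations : List (String × String)) : Prop :=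
  (((translations.find? (fun p => p.1 == "")).map Prod.snd).getD "") = ""
    ∨ pvEmptyWordSlot sentence.toList = false

instance (sentence : String) (translations : List (String × String)) : Decidable (Pre_sexChange sentence translations) := by unfold Pre_sexChange; infer_instance

def pvWitness_sexChange : String × (List (String × String)) :=
  ("He is my brother.", [("he", "she"), ("brother", "sister")])

def Spec_sexChange (sentence : String) (translations : List (String × String)) (out : String) : Prop := out = sexChange_alt sentence translations
instance (sentence : String) (translations : List (String × String)) (out : String) : Decidable (Spec_sexChange sentence translations out) := by unfold Spec_sexChange; infer_instance

-- ===== CLAIM (what is proved, stated in full; the proofs are below) =====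
def Claim_equal_sexChange : Prop := ∀ (sentence : String) (translations : List (String × String)), Dom_sexChange sentence translations → Pre_sexChange sentence translations → Spec_sexChange sentence translations (sexChange sentence translations)

-- ===== LEMMAS AND PROOFS =====

-- "rest of A's output, given pending word w and remaining input cs" (translation accumulator reset)
def arest (dic : List (String × String)) (w cs : List Char) : List Char :=
  (cs.foldl (stepA dic) (w, [])).2 ++ translateP (cs.foldl (stepA dic) (w, [])).1 dic

theorem arest_nil (dic : List (String × String)) (w : List Char) :
    arest dic w [] = translateP w dic := by simp [arest]

theorem arest_alpha (dic : List (String × String)) (w cs : List Char) {c : Char}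
    (h : PySem.Chars.isalpha c = true) :
    arest dic w (c :: cs) = arest dic (w ++ [c]) cs := by
  simp [arest, stepA, h]

theorem arest_shift (dic : List (String × String)) (cs : List Char) : ∀ w t,
    (cs.foldl (stepA dic) (w, t)).2 ++ translateP (cs.foldl (stepA dic) (w, t)).1 dic
      = t ++ arest dic w cs := by
  induction cs with
  | nil => intro w t; simp [arest]
  | cons c cs ih =>
    intro w t
    by_cases h : PySem.Chars.isalpha c = true
    · simp only [List.foldl_cons, stepA, h, if_pos]
      rw [ih, arest_alpha dic w cs h]
    · simp only [List.foldl_cons, stepA, h, if_neg, Bool.false_eq_true, not_false_iff]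
      rw [ih]
      have h2 : arest dic w (c :: cs) = (translateP w dic ++ [c]) ++ arest dic [] cs := by
        simp only [arest, List.foldl_cons, stepA, h, if_neg, Bool.false_eq_true, not_false_iff,
          List.nil_append]
        rw [ih]
        simp [arest]
      rw [h2]
      simp

theorem arest_sep (dic : List (String × String)) (w cs : List Char) {c : Char}
    (h : PySem.Chars.isalpha c = false) :
    arest dic w (c :: cs) = translateP w dic ++ [c] ++ arest dic [] cs := by
  simp only [arest, List.foldl_cons, stepA, h, Bool.false_eq_true, if_neg, not_false_iff,
    List.nil_append]
  rw [arest_shift]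
  simp [arest]

theorem goB_cons (dic : List (String × String)) (c : Char) (cs : List Char) :
    goB dic (c :: cs) =
      (if PySem.Chars.isalpha c then
          translateP (c :: cs.takeWhile (fun d => PySem.Chars.isalpha d == PySem.Chars.isalpha c)) dic
        else c :: cs.takeWhile (fun d => PySem.Chars.isalpha d == PySem.Chars.isalpha c)) ++
        goB dic (cs.dropWhile (fun d => PySem.Chars.isalpha d == PySem.Chars.isalpha c)) := by
  rw [goB]

theorem arest_alpha_run (dic : List (String × String)) :
    ∀ (run : List Char), run.all PySem.Chars.isalpha = true →
      ∀ w rest, arest dic w (run ++ rest) = arest dic (w ++ run) rest := by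
  intro run
  induction run with
  | nil => intro _ w rest; simp
  | cons c cs ih =>
    intro h w rest
    simp only [List.all_cons, Bool.and_eq_true] at h
    rw [List.cons_append, arest_alpha dic w _ h.1, ih h.2]
    simp

theorem translateP_empty (dic : List (String × String))
    (h : (((dic.find? (fun p => p.1 == "")).map Prod.snd).getD "") = "") :
    translateP [] dic = [] := by
  have hpred : (fun (p : String × String) => p.1.toList == ([] : List Char))
      = (fun p => p.1 == "") := by
    funext p
    rcases p with ⟨a, b⟩
    rw [Bool.eq_iff_iff]
    simp only [beq_iff_eq]
    constructor
    · intro hh; apply String.ext; simpa using hh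
    · intro hh; simp [hh]
  simp only [translateP, PySem.Chars.lower, List.map_nil, hpred]
  cases hf : dic.find? (fun p => p.1 == "") with
  | none => simp [pyIstitle, pyStrIslower, PySem.Chars.upper]
  | some p =>
    rw [hf] at h
    simp only [Option.map_some, Option.getD_some] at h
    simp [h, pyIstitle, pyStrIslower, PySem.Chars.upper]

-- === A = B when translate('') = '' ===
theorem goB_eq_arest_of_empty (dic : List (String × String))
    (htr : translateP [] dic = []) :
    ∀ n cs, cs.length ≤ n → goB dic cs = arest dic [] cs := by
  intro n
  induction n with
  | zero =>
    intro cs h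
    have : cs = [] := List.length_eq_zero_iff.mp (Nat.le_zero.mp h)
    subst this; simp [goB, arest_nil, htr]
  | succ n ih =>
    intro cs hlen
    cases cs with
    | nil => simp [goB, arest_nil, htr]
    | cons c cs' =>
      have hsplit := List.takeWhile_append_dropWhile
        (p := fun d => PySem.Chars.isalpha d == PySem.Chars.isalpha c) (l := cs')
      have hrestlen : (cs'.dropWhile (fun d => PySem.Chars.isalpha d == PySem.Chars.isalpha c)).length ≤ n := by
        have := List.length_dropWhile_le (fun d => PySem.Chars.isalpha d == PySem.Chars.isalpha c) cs'
        simp only [List.length_cons] at hlen; omega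
      by_cases hc : PySem.Chars.isalpha c = true
      · -- alphabetic run
        set run := cs'.takeWhile (fun d => PySem.Chars.isalpha d == PySem.Chars.isalpha c) with hrun
        set rest := cs'.dropWhile (fun d => PySem.Chars.isalpha d == PySem.Chars.isalpha c) with hrest
        have hrunall : run.all PySem.Chars.isalpha = true := by
          rw [List.all_eq_true]
          intro d hd
          have := List.mem_takeWhile_imp (hrun ▸ hd)
          simpa [hc] using this
        have hA : arest dic [] (c :: cs') = arest dic (c :: run) rest := by
          rw [arest_alpha dic [] cs' hc, ← hsplit]
          rw [arest_alpha_run dic run hrunall]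
          simp
        rw [hA, goB_cons, ← hrun, ← hrest, if_pos hc]
        cases hr : rest with
        | nil => simp [goB, arest_nil]
        | cons d r2 =>
          have hd : PySem.Chars.isalpha d = false := by
            have := List.head?_dropWhile_not
              (fun d => PySem.Chars.isalpha d == PySem.Chars.isalpha c) cs'
            rw [← hrest, hr] at this
            simpa [hc] using this
          rw [arest_sep dic (c :: run) r2 hd]
          have hB : goB dic (d :: r2) = arest dic [] (d :: r2) := by
            apply ih; rw [← hr]; exact hrestlen
          rw [hB, arest_sep dic [] r2 hd, htr]
          simp
      · -- separator run
        have hc' : PySem.Chars.isalpha c = false := by simpa using hc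
        set run := cs'.takeWhile (fun d => PySem.Chars.isalpha d == PySem.Chars.isalpha c) with hrun
        set rest := cs'.dropWhile (fun d => PySem.Chars.isalpha d == PySem.Chars.isalpha c) with hrest
        have hrunall : ∀ d ∈ run, PySem.Chars.isalpha d = false := by
          intro d hd
          have := List.mem_takeWhile_imp (hrun ▸ hd)
          simpa [hc'] using this
        have hsep : ∀ (r : List Char), (∀ d ∈ r, PySem.Chars.isalpha d = false) →
            ∀ cs0, arest dic [] (r ++ cs0) = r ++ arest dic [] cs0 := by
          intro r
          induction r with
          | nil => intro _ cs0; simp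
          | cons e tl ihr =>
            intro hall cs0
            rw [List.cons_append, arest_sep dic [] (tl ++ cs0) (hall e (by simp)), htr,
              ihr (fun d hd => hall d (by simp [hd])) cs0]
            simp
        have hA : arest dic [] (c :: cs') = (c :: run) ++ arest dic [] rest := by
          conv_lhs => rw [show c :: cs' = (c :: run) ++ rest by rw [List.cons_append, hsplit]]
          refine hsep (c :: run) ?_ rest
          intro d hd
          rcases List.mem_cons.mp hd with h | h
          · subst h; exact hc'
          · exact hrunall d h
        rw [hA, goB_cons, ← hrun, ← hrest, if_neg (by simp [hc']), ih rest hrestlen]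

-- === A = B when the sentence has no empty word slot ===
theorem pvSlotTail_suffix : ∀ (cs : List Char), pvSlotTail cs = false →
    ∀ rest, rest <:+ cs → rest ≠ [] → pvSlotTail rest = false := by
  intro cs
  induction cs with
  | nil =>
    intro _ rest hsuf hne
    exact absurd (List.suffix_nil.mp hsuf) hne
  | cons c cs' ih =>
    intro h rest hsuf hne
    rcases List.suffix_cons_iff.mp hsuf with h1 | h1
    · subst h1; exact h
    · cases cs' with
      | nil => exact absurd (List.suffix_nil.mp h1) hne
      | cons d tl =>
        have h2 : pvSlotTail (d :: tl) = false := by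
          simp only [pvSlotTail, Bool.or_eq_false_iff] at h
          exact h.2
        exact ih h2 rest h1 hne

theorem goB_eq_arest_of_noslot (dic : List (String × String)) :
    ∀ n cs, cs.length ≤ n → pvEmptyWordSlot cs = false → goB dic cs = arest dic [] cs := by
  intro n
  induction n with
  | zero =>
    intro cs h hs
    have : cs = [] := List.length_eq_zero_iff.mp (Nat.le_zero.mp h)
    subst this; simp [pvEmptyWordSlot] at hs
  | succ n ih =>
    intro cs hlen hs
    cases cs with
    | nil => simp [pvEmptyWordSlot] at hs
    | cons c cs' =>
      simp only [pvEmptyWordSlot, Bool.or_eq_false_iff, Bool.not_eq_false'] at hs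
      obtain ⟨hc, htail⟩ := hs
      have hsplit := List.takeWhile_append_dropWhile
        (p := fun d => PySem.Chars.isalpha d == PySem.Chars.isalpha c) (l := cs')
      set run := cs'.takeWhile (fun d => PySem.Chars.isalpha d == PySem.Chars.isalpha c) with hrun
      set rest := cs'.dropWhile (fun d => PySem.Chars.isalpha d == PySem.Chars.isalpha c) with hrest
      have hrestlen : rest.length ≤ n := by
        have h9 := List.length_dropWhile_le (fun d => PySem.Chars.isalpha d == PySem.Chars.isalpha c) cs'
        rw [← hrest] at h9
        simp only [List.length_cons] at hlen; omega
      have hrunall : run.all PySem.Chars.isalpha = true := by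
        rw [List.all_eq_true]
        intro d hd
        have := List.mem_takeWhile_imp (hrun ▸ hd)
        simpa [hc] using this
      have hrestsuf : rest <:+ c :: cs' := (List.dropWhile_suffix _).trans (List.suffix_cons c cs')
      have hA : arest dic [] (c :: cs') = arest dic (c :: run) rest := by
        rw [arest_alpha dic [] cs' hc, ← hsplit, arest_alpha_run dic run hrunall]
        simp
      rw [hA, goB_cons, ← hrun, ← hrest, if_pos hc]
      cases hr : rest with
      | nil => simp [goB, arest_nil]
      | cons d r2 =>
        have hd : PySem.Chars.isalpha d = false := by
          have := List.head?_dropWhile_not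
            (fun d => PySem.Chars.isalpha d == PySem.Chars.isalpha c) cs'
          rw [← hrest, hr] at this
          simpa [hc] using this
        cases r2 with
        | nil =>
          exfalso
          have : pvSlotTail [d] = false :=
            pvSlotTail_suffix (c :: cs') htail [d] (hr ▸ hrestsuf) (by simp)
          simp [pvSlotTail, hd] at this
        | cons e r3 =>
          have hde : pvSlotTail (d :: e :: r3) = false :=
            pvSlotTail_suffix (c :: cs') htail _ (hr ▸ hrestsuf) (by simp)
          simp only [pvSlotTail, Bool.or_eq_false_iff, Bool.and_eq_false_iff,
            Bool.not_eq_false'] at hde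
          have he : PySem.Chars.isalpha e = true := by
            rcases hde.1 with h1 | h1
            · rw [h1] at hd; simp at hd
            · exact h1
          have her : pvEmptyWordSlot (e :: r3) = false := by
            simp only [pvEmptyWordSlot, Bool.or_eq_false_iff, Bool.not_eq_false']
            exact ⟨he, hde.2⟩
          have hlen3 : (e :: r3).length ≤ n := by
            have : rest.length ≤ n := hrestlen
            rw [hr] at this; simp only [List.length_cons] at this ⊢; omega
          have hgoBd : goB dic (d :: e :: r3) = [d] ++ goB dic (e :: r3) := by
            rw [goB_cons]
            have htw : (e :: r3).takeWhile (fun x => PySem.Chars.isalpha x == PySem.Chars.isalpha d) = [] := by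
              simp [hd, he]
            have hdw : (e :: r3).dropWhile (fun x => PySem.Chars.isalpha x == PySem.Chars.isalpha d) = e :: r3 := by
              simp [hd, he]
            rw [htw, hdw, if_neg (by simp [hd])]
          rw [hgoBd, arest_sep dic (c :: run) (e :: r3) hd,
            ih (e :: r3) hlen3 her]
          simp

-- ===== VERDICT (by name: the statement is the Claim_ definition above) =====
theorem sexChange_spec : Claim_equal_sexChange := by
  intro sentence translations _ hpre
  have hmain : goB translations sentence.toList = arest translations [] sentence.toList := by
    rcases hpre with hk | hslot
    · exact goB_eq_arest_of_empty translations (translateP_empty translations hk)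
        sentence.toList.length sentence.toList le_rfl
    · exact goB_eq_arest_of_noslot translations sentence.toList.length sentence.toList le_rfl hslot
  show sexChange sentence translations = sexChange_alt sentence translations
  unfold sexChange sexChange_alt
  rw [hmain]
  rfl
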